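-- pv_equiv track=rewrite | github.com/ThisIsYoyo/leetcode_challenge | problem_1834_single_threaded_cpu.py | getOrder
-- ===== SOURCE A (Python) =====
-- from typing import List
--
-- def getOrder(tasks: List[List[int]]) -> List[int]:
--     # init
--     time = 1
--     not_ava_tasks_by_queue_time = [
--         (task_info[0], task_info[1], task_idx)  # queue time, process time, idx
--         for task_idx, task_info in enumerate(tasks)
--     ]
--     not_ava_tasks_by_queue_time.sort()
--     wait_to_process_tasks = []  # process time, idx
--     result_orders = []
--
--     while not_ava_tasks_by_queue_time:
--         if not wait_to_process_tasks and not_ava_tasks_by_queue_time[0][0] > time: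
--             time = not_ava_tasks_by_queue_time[0][0]
--
--         while not_ava_tasks_by_queue_time and not_ava_tasks_by_queue_time[0][0] <= time:
--             q_t, p_t, idx = not_ava_tasks_by_queue_time.pop(0)
--             wait_to_process_tasks.append((p_t, idx))
--
--         wait_to_process_tasks.sort()
--         process_time, task_idx = wait_to_process_tasks.pop(0)
--
--         result_orders.append(task_idx)
--         time += process_time
--
--     if wait_to_process_tasks:
--         result_orders.extend([task_idx for _, task_idx in wait_to_process_tasks])
--
--     return result_orders
-- ===== SOURCE B (Python) =====
-- def getOrder(tasks):
--     order = sorted((t[0], t[1], i) for i, t in enumerate(tasks))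
--     n = len(order)
--     time = 1
--     i = 0
--     ready = []  # kept sorted ascending by (process_time, idx)
--     res = []
--     while len(res) < n:
--         if not ready and order[i][0] > time:
--             time = order[i][0]
--         while i < n and order[i][0] <= time:
--             _, p, idx = order[i]
--             lo, hi = 0, len(ready)
--             while lo < hi:
--                 mid = (lo + hi) // 2
--                 if ready[mid] < (p, idx):
--                     lo = mid + 1
--                 else:
--                     hi = mid
--             ready.insert(lo, (p, idx))
--             i += 1
--         p, idx = ready.pop(0)
--         res.append(idx)
--         time += p
--     return res
-- ===== Notes on version B (the rewrite author's own statement) =====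
-- stated objective: alternative
-- what changed: B replaces A's re-sort of the whole waiting list on every iteration (plus pop(0) on the task queue) by a single index pointer over the queue-sorted tasks and a waiting list kept sorted incrementally via hand-written binary-search insertion, popping its head; intended as faster (O(n log n) comparisons vs A's repeated sorts) but a timing run could not confirm a consistent speed-up, so no speed is claimed.
import Mathlib
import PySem

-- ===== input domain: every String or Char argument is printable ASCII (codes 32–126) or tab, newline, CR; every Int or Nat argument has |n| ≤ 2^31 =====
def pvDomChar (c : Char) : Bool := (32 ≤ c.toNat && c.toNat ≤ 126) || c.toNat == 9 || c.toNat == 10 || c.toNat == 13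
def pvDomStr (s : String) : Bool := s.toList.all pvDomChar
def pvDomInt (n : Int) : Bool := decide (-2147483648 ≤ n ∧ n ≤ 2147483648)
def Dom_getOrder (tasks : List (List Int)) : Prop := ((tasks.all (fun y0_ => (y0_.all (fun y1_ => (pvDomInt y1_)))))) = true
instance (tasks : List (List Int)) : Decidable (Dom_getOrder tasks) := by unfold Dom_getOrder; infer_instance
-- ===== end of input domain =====

-- B replaces A's per-iteration full sort of the waiting list (and pop(0) on the queue list) by an
-- index pointer over the queue-sorted tasks plus a waiting list kept sorted by binary-search insertion.

-- Python tuple comparison is lexicographic: key into Mathlib's Lex order.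
def pvKeyP (x : Int × Int) : Lex (Int × Int) := toLex x
def pvKeyT (t : Int × Int × Int) : Lex (Int × Lex (Int × Int)) := toLex (t.1, toLex t.2)

-- ===== PORT A =====
-- the comprehension '[(t[0], t[1], i) for i, t in enumerate(tasks)]'; pyGetD is exact under
-- Pre_getOrder (every inner list has ≥ 2 entries; otherwise Python raises IndexError)
def pvTriples (tasks : List (List Int)) : List (Int × Int × Int) :=
  (PySem.List.enumerate tasks 0).map
    (fun e => (PySem.List.pyGetD e.2 0 0, PySem.List.pyGetD e.2 1 0, e.1))

-- A's inner while: pop(0) tasks whose queue time has arrived, appending (p, idx) to the wait list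
def pvTransferA : List (Int × Int × Int) → Int → List (Int × Int) →
    List (Int × Int × Int) × List (Int × Int)
  | [], _, wait => ([], wait)
  | t :: rest, time, wait =>
    if t.1 ≤ time then pvTransferA rest time (wait ++ [(t.2.1, t.2.2)])
    else (t :: rest, wait)

-- A's outer while (fuel only makes the recursion structural; tasks.length + 1 is always enough)
def pvLoopA : Nat → List (Int × Int × Int) → List (Int × Int) → Int → List Int → List Int
  | 0, _, wait, _, res => res ++ wait.map (·.2)
  | fuel + 1, notAva, wait, time, res =>
    match notAva with
    | [] => res ++ wait.map (·.2)        -- while exits; trailing 'if wait: extend' (extend of [] is a no-op)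
    | t :: rest =>
      let time1 := if wait = [] ∧ time < t.1 then t.1 else time
      match pvTransferA (t :: rest) time1 wait with
      | (na2, wait2) =>
        match PySem.List.sorted wait2 pvKeyP with
        | [] => res                       -- unreachable (Python would raise IndexError on pop from [])
        | w :: wrest => pvLoopA fuel na2 wrest (time1 + w.1) (res ++ [w.2])

def getOrder (tasks : List (List Int)) : List Int :=
  pvLoopA (tasks.length + 1) (PySem.List.sorted (pvTriples tasks) pvKeyT) [] 1 []

-- ===== PORT B =====
-- Python tuple '<' on (p, idx) pairs (lexicographic)
def pvPltb (y x : Int × Int) : Bool := decide (y.1 < x.1 ∨ (y.1 = x.1 ∧ y.2 < x.2))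

-- B's binary-search loop: lo, hi ≥ 0, so Python's (lo+hi)//2 is Nat division; ready[mid] is in
-- range at every call site (hi ≤ len(ready)), so getD's default is never read; the fuel argument
-- only makes the recursion structural (hi - lo ≤ fuel at every call site)
def pvBisect (ready : List (Int × Int)) (x : Int × Int) : Nat → Nat → Nat → Nat
  | 0, lo, _ => lo
  | fuel + 1, lo, hi =>
    if lo < hi then
      if pvPltb (ready.getD ((lo + hi) / 2) (0, 0)) x then pvBisect ready x fuel ((lo + hi) / 2 + 1) hi
      else pvBisect ready x fuel lo ((lo + hi) / 2)
    else lo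

-- 'ready.insert(lo, (p, idx))' after the binary search
def pvIns (ready : List (Int × Int)) (x : Int × Int) : List (Int × Int) :=
  PySem.List.insert ready ((pvBisect ready x ready.length 0 ready.length : Nat) : Int) x

-- B's inner while: advance the pointer over all arrived tasks, inserting each into sorted
-- position (fuel only makes the recursion structural; order.length - i ≤ fuel at every call site)
def pvFillB (order : List (Int × Int × Int)) : Nat → Nat → Int → List (Int × Int) →
    Nat × List (Int × Int)
  | 0, i, _, ready => (i, ready)
  | fuel + 1, i, time, ready =>
    if i < order.length ∧ (order.getD i (0, 0, 0)).1 ≤ time then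
      pvFillB order fuel (i + 1) time (pvIns ready ((order.getD i (0, 0, 0)).2.1, (order.getD i (0, 0, 0)).2.2))
    else (i, ready)

-- B's outer while (fuel only makes the recursion structural; order.length + 1 is always enough)
def pvLoopB (order : List (Int × Int × Int)) : Nat → Nat → List (Int × Int) → Int → List Int → List Int
  | 0, _, _, _, res => res
  | fuel + 1, i, ready, time, res =>
    if res.length < order.length then
      let time1 := if ready = [] ∧ time < (PySem.List.pyGetD order (i : Int) (0, 0, 0)).1
                   then (PySem.List.pyGetD order (i : Int) (0, 0, 0)).1 else time
      match pvFillB order order.length i time1 ready with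
      | (i2, ready2) =>
        match ready2 with
        | [] => res                       -- unreachable (Python would raise IndexError on pop from [])
        | w :: rrest => pvLoopB order fuel i2 rrest (time1 + w.1) (res ++ [w.2])
    else res

def getOrder_alt (tasks : List (List Int)) : List Int :=
  let order := PySem.List.sorted (pvTriples tasks) pvKeyT
  pvLoopB order (order.length + 1) 0 [] 1 []

-- ===== PRECONDITION & SPEC =====
-- Pre_ excludes exactly the inputs where Python raises: an inner list with fewer than 2 entries
-- makes task_info[0] / task_info[1] raise IndexError (in A and in B alike).
def Pre_getOrder (tasks : List (List Int)) : Prop := ∀ t ∈ tasks, 2 ≤ t.length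
instance (tasks : List (List Int)) : Decidable (Pre_getOrder tasks) := by unfold Pre_getOrder; infer_instance
def pvWitness_getOrder : List (List Int) := [[2, 3], [1, 2], [1, 1]]

def Spec_getOrder (tasks : List (List Int)) (out : List Int) : Prop := out = getOrder_alt tasks
instance (tasks : List (List Int)) (out : List Int) : Decidable (Spec_getOrder tasks out) := by unfold Spec_getOrder; infer_instance

-- ===== CLAIM (what is proved, stated in full; the proofs are below) =====
def Claim_equal_getOrder : Prop := ∀ (tasks : List (List Int)), Dom_getOrder tasks → Pre_getOrder tasks → Spec_getOrder tasks (getOrder tasks)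

-- ===== LEMMAS AND PROOFS =====

-- Python tuple '<' agrees with the Lex key order
lemma pvPltb_iff (y x : Int × Int) : pvPltb y x = true ↔ pvKeyP y < pvKeyP x := by
  simp [pvPltb, pvKeyP, Prod.Lex.lt_iff]

lemma pvKeyP_inj {x y : Int × Int} (h : pvKeyP x = pvKeyP y) : x = y :=
  toLex.injective h

-- A's inner while is the takeWhile/dropWhile split of the arrived prefix
lemma pvTransferA_eq (l : List (Int × Int × Int)) (time : Int) (w : List (Int × Int)) :
    pvTransferA l time w =
      (l.dropWhile (fun s => decide (s.1 ≤ time)),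
       w ++ (l.takeWhile (fun s => decide (s.1 ≤ time))).map (fun s => (s.2.1, s.2.2))) := by
  induction l generalizing w with
  | nil => simp [pvTransferA]
  | cons t rest ih =>
    by_cases h : t.1 ≤ time <;>
      simp [pvTransferA, h, ih]

-- B's inner while processes the same arrived prefix, one sorted insertion each
lemma pvFillB_eq (order : List (Int × Int × Int)) (time : Int) :
    ∀ (d i : Nat) (w : List (Int × Int)), order.length - i ≤ d → i ≤ order.length →
    pvFillB order d i time w =
      (i + ((order.drop i).takeWhile (fun s => decide (s.1 ≤ time))).length,
       (((order.drop i).takeWhile (fun s => decide (s.1 ≤ time))).map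
          (fun s => (s.2.1, s.2.2))).foldl pvIns w) := by
  intro d
  induction d with
  | zero =>
    intro i w hd hi
    simp [pvFillB, List.drop_eq_nil_iff.mpr (show order.length ≤ i by omega)]
  | succ d ih =>
    intro i w hd hi
    rw [pvFillB]
    by_cases hc : i < order.length ∧ (order.getD i (0, 0, 0)).1 ≤ time
    · rw [if_pos hc]
      have hlt := hc.1
      have hgd : order.getD i (0, 0, 0) = order[i] := List.getD_eq_getElem _ _ hlt
      have hdrop : order.drop i = order[i] :: order.drop (i + 1) := List.drop_eq_getElem_cons hlt
      rw [ih (i + 1) _ (by omega) (by omega)]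
      rw [hdrop, List.takeWhile_cons, if_pos (by rw [hgd] at hc; exact decide_eq_true hc.2)]
      simp only [List.map_cons, List.foldl_cons, List.length_cons, hgd]
      exact Prod.ext (by omega) rfl
    · rw [if_neg hc]
      rcases Nat.lt_or_ge i order.length with hlt | hge
      · have hgd : order.getD i (0, 0, 0) = order[i] := List.getD_eq_getElem _ _ hlt
        have hdrop : order.drop i = order[i] :: order.drop (i + 1) := List.drop_eq_getElem_cons hlt
        have hfalse : ¬ order[i].1 ≤ time := by
          intro hle; exact hc ⟨hlt, by rw [hgd]; exact hle⟩
        rw [hdrop, List.takeWhile_cons, if_neg (by simpa using hfalse)]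
        simp
      · rw [List.drop_eq_nil_iff.mpr (by omega)]
        simp

lemma pvPltb_false_iff (y x : Int × Int) : pvPltb y x = false ↔ pvKeyP x ≤ pvKeyP y := by
  rw [← Bool.not_eq_true, pvPltb_iff, not_lt]

-- the binary search finds the partition point of (· < x) in a sorted list
lemma pvBisect_spec (w : List (Int × Int)) (x : Int × Int)
    (hw : w.Pairwise (fun a b => pvKeyP a ≤ pvKeyP b)) :
    ∀ (d lo hi : Nat), hi - lo ≤ d → lo ≤ hi → hi ≤ w.length →
    (∀ (j : Nat) (hj : j < w.length), j < lo → pvPltb w[j] x = true) →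
    (∀ (j : Nat) (hj : j < w.length), hi ≤ j → pvPltb w[j] x = false) →
    pvBisect w x d lo hi ≤ w.length ∧
      (∀ (j : Nat) (hj : j < w.length), j < pvBisect w x d lo hi → pvPltb w[j] x = true) ∧
      (∀ (j : Nat) (hj : j < w.length), pvBisect w x d lo hi ≤ j → pvPltb w[j] x = false) := by
  intro d
  induction d with
  | zero =>
    intro lo hi hd hlo hhi h1 h2
    have heq : lo = hi := by omega
    subst heq
    rw [pvBisect]
    exact ⟨by omega, h1, fun j hj hk => h2 j hj hk⟩
  | succ d ih =>
    intro lo hi hd hlo hhi h1 h2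
    rw [pvBisect]
    by_cases hlt : lo < hi
    · rw [if_pos hlt]
      have hmlt : (lo + hi) / 2 < w.length := by omega
      have hgd : w.getD ((lo + hi) / 2) (0, 0) = w[(lo + hi) / 2] := List.getD_eq_getElem _ _ hmlt
      rw [hgd]
      by_cases hm : pvPltb w[(lo + hi) / 2] x = true
      · rw [if_pos hm]
        refine ih ((lo + hi) / 2 + 1) hi (by omega) (by omega) hhi ?_ h2
        intro j hj hjk
        rcases Nat.lt_or_ge j lo with h | h
        · exact h1 j hj h
        · rcases Nat.eq_or_lt_of_le (show j ≤ (lo + hi) / 2 by omega) with heq | hjm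
          · subst heq; exact hm
          · have hmono := List.pairwise_iff_getElem.mp hw j ((lo + hi) / 2) hj hmlt hjm
            rw [pvPltb_iff] at hm ⊢
            exact lt_of_le_of_lt hmono hm
      · have hm' : pvPltb w[(lo + hi) / 2] x = false := Bool.eq_false_iff.mpr hm
        rw [if_neg hm]
        refine ih lo ((lo + hi) / 2) (by omega) (by omega) (by omega) h1 ?_
        intro j hj hk
        rcases Nat.eq_or_lt_of_le hk with heq | hjm
        · subst heq; exact hm'
        · have hmono := List.pairwise_iff_getElem.mp hw ((lo + hi) / 2) j hmlt hj hjm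
          rw [pvPltb_false_iff] at hm' ⊢
          exact le_trans hm' hmono
    · rw [if_neg hlt]
      have heq : lo = hi := by omega
      subst heq
      exact ⟨by omega, h1, fun j hj hk => h2 j hj hk⟩

-- stable insertion at a characterised partition point
lemma insertBy_eq_take_drop (x : Int × Int) (l : List (Int × Int)) (k : Nat) (hk : k ≤ l.length)
    (h1 : ∀ (j : Nat) (hj : j < l.length), j < k → (decide (pvKeyP x < pvKeyP l[j]) : Bool) = false)
    (h2 : ∀ (j : Nat) (hj : j < l.length), k ≤ j → (decide (pvKeyP x < pvKeyP l[j]) : Bool) = true) :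
    PySem.List.insertBy (fun a b => decide (pvKeyP a < pvKeyP b)) x l = l.take k ++ x :: l.drop k := by
  induction l generalizing k with
  | nil =>
    have hk0 : k = 0 := by simpa using hk
    subst hk0
    simp [PySem.List.insertBy]
  | cons y t ih =>
    cases k with
    | zero =>
      have h := h2 0 (by simp) (by omega)
      simp only [List.getElem_cons_zero] at h
      simp [PySem.List.insertBy, of_decide_eq_true h]
    | succ k =>
      have h0 := h1 0 (by simp) (by omega)
      simp only [List.getElem_cons_zero] at h0
      rw [show PySem.List.insertBy (fun a b => decide (pvKeyP a < pvKeyP b)) x (y :: t) =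
            y :: PySem.List.insertBy (fun a b => decide (pvKeyP a < pvKeyP b)) x t from by
          simp [PySem.List.insertBy, of_decide_eq_false h0]]
      simp only [List.take_succ_cons, List.drop_succ_cons, List.cons_append]
      congr 1
      exact ih k (by simpa using hk)
        (fun j hj hjk => by simpa using h1 (j + 1) (by simpa) (by omega))
        (fun j hj hjk => by simpa using h2 (j + 1) (by simpa) (by omega))

-- B's binary-search insertion = the stable sorted insertion, for a fresh element
lemma pvIns_eq_insertBy (w : List (Int × Int)) (x : Int × Int)
    (hw : w.Pairwise (fun a b => pvKeyP a ≤ pvKeyP b)) (hx : x.2 ∉ w.map Prod.snd) :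
    pvIns w x = PySem.List.insertBy (fun a b => decide (pvKeyP a < pvKeyP b)) x w := by
  have hspec := pvBisect_spec w x hw w.length 0 w.length (by omega) (by omega) (by omega)
    (fun j hj hjk => absurd hjk (by omega)) (fun j hj hk => absurd hj (by omega))
  rw [pvIns, PySem.List.insert_natCast w _ x hspec.1]
  rw [insertBy_eq_take_drop x w (pvBisect w x w.length 0 w.length) hspec.1 ?_ ?_]
  · intro j hj hjk
    have hlt := hspec.2.1 j hj hjk
    rw [pvPltb_iff] at hlt
    exact decide_eq_false (lt_asymm hlt)
  · intro j hj hk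
    have hle := hspec.2.2 j hj hk
    rw [pvPltb_false_iff] at hle
    have hne : pvKeyP x ≠ pvKeyP w[j] := by
      intro hkeq
      have hxw : x = w[j] := pvKeyP_inj hkeq
      exact hx (by rw [hxw]; exact List.mem_map_of_mem (List.getElem_mem hj))
    exact decide_eq_true (lt_of_le_of_ne hle hne)

-- folding B's insertions = folding the stable insertion, and the result stays sorted
lemma pvFold_facts (moved : List (Int × Int)) : ∀ (w : List (Int × Int)),
    w.Pairwise (fun a b => pvKeyP a ≤ pvKeyP b) →
    ((w ++ moved).map Prod.snd).Nodup →
    moved.foldl pvIns w =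
        moved.foldl (fun acc x => PySem.List.insertBy (fun a b => decide (pvKeyP a < pvKeyP b)) x acc) w ∧
      (moved.foldl pvIns w).Pairwise (fun a b => pvKeyP a ≤ pvKeyP b) := by
  induction moved with
  | nil => intro w hw hnd; exact ⟨rfl, hw⟩
  | cons x ms ih =>
    intro w hw hnd
    have hx : x.2 ∉ w.map Prod.snd := by
      rw [List.map_append, List.nodup_append] at hnd
      intro hmem
      exact hnd.2.2 _ hmem _ (by simp) rfl
    have hstep := pvIns_eq_insertBy w x hw hx
    have hw2 := PySem.List.insertBy_pairwise_le pvKeyP x w hw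
    have hperm : (PySem.List.insertBy (fun a b => decide (pvKeyP a < pvKeyP b)) x w).Perm (x :: w) :=
      PySem.List.insertBy_perm _ x w
    have hnd2 : (((PySem.List.insertBy (fun a b => decide (pvKeyP a < pvKeyP b)) x w) ++ ms).map
        Prod.snd).Nodup := by
      have hp2 : (PySem.List.insertBy (fun a b => decide (pvKeyP a < pvKeyP b)) x w ++ ms).Perm
          (w ++ x :: ms) := (hperm.append_right ms).trans List.perm_middle.symm
      exact ((hp2.map Prod.snd).nodup_iff).mpr hnd
    simp only [List.foldl_cons, hstep]
    exact ih _ hw2 hnd2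

lemma pairwise_lt_of_le_nodup (l : List (Int × Int))
    (h : l.Pairwise (fun a b => pvKeyP a ≤ pvKeyP b)) (hnd : l.Nodup) :
    l.Pairwise (fun a b => pvKeyP a < pvKeyP b) := by
  refine (h.and hnd).imp ?_
  rintro a b ⟨hle, hne⟩
  exact lt_of_le_of_ne hle (fun hk => hne (pvKeyP_inj hk))

-- once the pointer is exhausted, B's loop drains the ready list in order
lemma pvLoopB_drain (order : List (Int × Int × Int)) : ∀ (fuel : Nat) (w : List (Int × Int))
    (time : Int) (res : List Int),
    res.length + w.length = order.length → w.length < fuel →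
    pvLoopB order fuel order.length w time res = res ++ w.map (·.2) := by
  intro fuel w
  induction w generalizing fuel with
  | nil =>
    intro time res hlen hf
    obtain ⟨f, rfl⟩ : ∃ f, fuel = f + 1 := ⟨fuel - 1, by omega⟩
    rw [pvLoopB, if_neg (by simp at hlen; omega)]
    simp
  | cons x t ih =>
    intro time res hlen hf
    obtain ⟨f, rfl⟩ : ∃ f, fuel = f + 1 := ⟨fuel - 1, by omega⟩
    rw [pvLoopB, if_pos (by simp at hlen; omega)]
    have hfill : ∀ tm, pvFillB order order.length order.length tm (x :: t) = (order.length, x :: t) := by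
      intro tm
      rw [pvFillB_eq order tm order.length order.length (x :: t) (by omega) (by omega)]
      simp [List.drop_eq_nil_iff.mpr (le_refl order.length)]
    simp only [List.cons_ne_nil, false_and, if_false, hfill]
    rw [ih f (time + x.1) (res ++ [x.2]) (by simp at hlen ⊢; omega) (by simp at hf ⊢; omega)]
    simp

-- the main loop correspondence
lemma pvLoop_eq (order : List (Int × Int × Int)) : ∀ (fa : Nat) (fb i : Nat)
    (w : List (Int × Int)) (time : Int) (res : List Int),
    i ≤ order.length →
    i = res.length + w.length →
    ((w.map Prod.snd) ++ ((order.drop i).map (fun t => t.2.2))).Nodup →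
    w.Pairwise (fun a b => pvKeyP a ≤ pvKeyP b) →
    (order.length - i) + w.length < fa →
    (order.length - i) + w.length < fb →
    pvLoopA fa (order.drop i) w time res = pvLoopB order fb i w time res := by
  intro fa
  induction fa with
  | zero =>
    intro fb i w time res hi hcount hnd hw hfa hfb
    exact absurd hfa (by omega)
  | succ fa ih =>
    intro fb i w time res hi hcount hnd hw hfa hfb
    obtain ⟨fb', rfl⟩ : ∃ f, fb = f + 1 := ⟨fb - 1, by omega⟩
    rcases hrem : order.drop i with _ | ⟨t, rest⟩
    · -- pointer exhausted: A extends the (sorted) leftovers, B drains them one pop at a time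
      have hieq : i = order.length := by
        have := List.drop_eq_nil_iff.mp hrem; omega
      subst hieq
      rw [pvLoopB_drain order (fb' + 1) w time res (by omega) (by omega)]
      simp [pvLoopA]
    · have hilt : i < order.length := by
        rcases Nat.lt_or_ge i order.length with h | h
        · exact h
        · rw [List.drop_eq_nil_iff.mpr (by omega)] at hrem; cases hrem
      have hdrop := List.drop_eq_getElem_cons hilt
      rw [hrem] at hdrop hnd
      injection hdrop with h1 h2
      have hgetd : PySem.List.pyGetD order (i : Int) (0, 0, 0) = t := by
        rw [PySem.List.pyGetD_natCast, List.getD_eq_getElem _ _ hilt]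
        exact h1.symm
      have hguard : res.length < order.length := by omega
      have hlen_drop : rest.length + 1 = order.length - i := by
        have hl : (order.drop i).length = order.length - i := List.length_drop
        rw [hrem] at hl; simpa using hl
      simp only [pvLoopA, pvLoopB, hgetd]
      rw [if_pos hguard]
      set time1 : Int := if w = [] ∧ time < t.1 then t.1 else time with htime1
      rw [pvTransferA_eq, pvFillB_eq order time1 order.length i w (by omega) (by omega), hrem]
      set tw := List.takeWhile (fun s => decide (s.1 ≤ time1)) (t :: rest) with htw
      set dw := List.dropWhile (fun s => decide (s.1 ≤ time1)) (t :: rest) with hdw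
      set moved := tw.map (fun s => (s.2.1, s.2.2)) with hmoved
      have hsplit : tw ++ dw = t :: rest := by
        rw [htw, hdw]; exact List.takeWhile_append_dropWhile
      have htwlen : tw.length ≤ rest.length + 1 := by
        have := congrArg List.length hsplit
        simp at this; omega
      have hidx : (t :: rest).map (fun s => s.2.2) = tw.map (fun s => s.2.2) ++ dw.map (fun s => s.2.2) := by
        rw [← List.map_append, hsplit]
      have hrw : (w ++ moved).map Prod.snd = w.map Prod.snd ++ tw.map (fun s => s.2.2) := by
        simp [hmoved, List.map_map, Function.comp_def]
      have hsnds : ((w ++ moved).map Prod.snd).Nodup := by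
        rw [hrw]
        have hsub : (w.map Prod.snd ++ tw.map (fun s => s.2.2)).Sublist
            (w.map Prod.snd ++ ((t :: rest).map (fun s => s.2.2))) := by
          rw [hidx]; exact (List.sublist_append_left _ _).append_left _
        exact List.Nodup.sublist hsub hnd
      obtain ⟨heqfold, hpair⟩ := pvFold_facts moved w hw hsnds
      set r := moved.foldl
          (fun acc x => PySem.List.insertBy (fun a b => decide (pvKeyP a < pvKeyP b)) x acc) w
        with hrdef
      rw [heqfold] at hpair
      have hperm : r.Perm (w ++ moved) := PySem.List.foldl_insertBy_perm _ moved w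
      have hndr : r.Nodup := hperm.nodup_iff.mpr (List.Nodup.of_map _ hsnds)
      have hsorted : PySem.List.sorted (w ++ moved) pvKeyP = r :=
        PySem.List.sorted_eq_of_perm_of_pairwise_lt _ _ pvKeyP hperm
          (pairwise_lt_of_le_nodup r hpair hndr)
      have hlenr : r.length = w.length + tw.length := by
        rw [hperm.length_eq]; simp [hmoved]
      have hrne : r ≠ [] := by
        intro h0
        have hl0 := hlenr
        rw [h0] at hl0
        simp at hl0
        have htt : (fun s => decide (s.1 ≤ time1)) t = true := by
          rw [htime1]
          have hw0 : w = [] := List.length_eq_zero_iff.mp (by omega)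
          by_cases hc : time < t.1
          · simp [hw0, hc]
          · simp [hw0, hc]; omega
        rw [htw, List.takeWhile_cons, if_pos htt] at hl0
        simp at hl0
      obtain ⟨xh, rr, hr⟩ : ∃ xh rr, r = xh :: rr := by
        rcases hrc : r with _ | ⟨xh, rr⟩
        · exact absurd hrc hrne
        · exact ⟨xh, rr, rfl⟩
      have e1 : rr.length + 1 = w.length + tw.length := by
        rw [hr] at hlenr; simpa using hlenr
      rw [heqfold, hsorted, hr]
      -- both sides are now one recursive call; align the remaining task list
      have hdw2 : order.drop (i + tw.length) = dw := by
        rw [← List.drop_drop, hrem, ← hsplit, List.drop_left]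
      have hps : (r.map Prod.snd).Perm (w.map Prod.snd ++ tw.map (fun s => s.2.2)) := by
        have hp := hperm.map Prod.snd
        rwa [hrw] at hp
      have hbig : ((r.map Prod.snd) ++ dw.map (fun s => s.2.2)).Nodup := by
        refine ((hps.append_right _).nodup_iff).mpr ?_
        rw [List.append_assoc, ← hidx]
        exact hnd
      have hnd2 : ((rr.map Prod.snd) ++ ((order.drop (i + tw.length)).map (fun t => t.2.2))).Nodup := by
        rw [hdw2]
        rw [hr] at hbig
        simp only [List.map_cons, List.cons_append] at hbig
        exact (List.nodup_cons.mp hbig).2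
      rw [hr] at hpair
      have := ih fb' (i + tw.length) rr (time1 + xh.1) (res ++ [xh.2])
        (by omega) (by simp only [List.length_append, List.length_cons, List.length_nil]; omega)
        hnd2 ((List.pairwise_cons.mp hpair).2) (by omega) (by omega)
      rw [hdw2] at this
      exact this

-- ===== VERDICT (by name: the statement is the Claim_ definition above) =====
theorem getOrder_spec : Claim_equal_getOrder := by
  intro tasks _ _
  unfold Spec_getOrder getOrder getOrder_alt
  have hlen : (PySem.List.sorted (pvTriples tasks) pvKeyT).length = tasks.length := by
    simp [PySem.List.length_sorted, pvTriples, PySem.List.length_enumerate]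
  have hnd : (((PySem.List.sorted (pvTriples tasks) pvKeyT).map (fun t => t.2.2))).Nodup := by
    have hperm : ((PySem.List.sorted (pvTriples tasks) pvKeyT).map (fun t => t.2.2)).Perm
        ((pvTriples tasks).map (fun t => t.2.2)) :=
      (PySem.List.sorted_perm (pvTriples tasks) pvKeyT false).map _
    refine hperm.nodup_iff.mpr ?_
    have : (pvTriples tasks).map (fun t => t.2.2) = (PySem.List.enumerate tasks 0).map (·.1) := by
      simp [pvTriples]
    rw [this, PySem.List.map_fst_enumerate]
    exact PySem.List.nodup_pyRange_one 0 _
  have := pvLoop_eq (PySem.List.sorted (pvTriples tasks) pvKeyT)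
      (tasks.length + 1) ((PySem.List.sorted (pvTriples tasks) pvKeyT).length + 1) 0 [] 1 []
      (by omega) (by simp) (by simpa using hnd) (by simp)
      (by simp only [hlen, List.length_nil]; omega) (by simp only [List.length_nil]; omega)
  simpa using this
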